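-- pv_equiv track=rewrite | github.com/chris-kwas/smoothstack_assignments-1 | day4_assignments/assignment 4-1.py | func13
-- ===== SOURCE A (Python) =====
-- def func13(text):
--     text_length = len(text)
--     new_text = ""
--     for x in range(text_length):
--         if x == 0 or x == 3:
--             new_text += text[x].upper()
--         else:
--             new_text += text[x]
--     return new_text
-- ===== SOURCE B (Python) =====
-- def func13(text):
--     return text[:1].upper() + text[1:3] + text[3:4].upper() + text[4:]
-- ===== Notes on version B (the rewrite author's own statement) =====
-- stated objective: simpler
-- what changed: Replaces the per-index loop with a per-character branch and repeated string concatenation by a single closed-form slice expression that uppercases the slices at positions 0 and 3 and concatenates four pieces.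
import Mathlib
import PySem

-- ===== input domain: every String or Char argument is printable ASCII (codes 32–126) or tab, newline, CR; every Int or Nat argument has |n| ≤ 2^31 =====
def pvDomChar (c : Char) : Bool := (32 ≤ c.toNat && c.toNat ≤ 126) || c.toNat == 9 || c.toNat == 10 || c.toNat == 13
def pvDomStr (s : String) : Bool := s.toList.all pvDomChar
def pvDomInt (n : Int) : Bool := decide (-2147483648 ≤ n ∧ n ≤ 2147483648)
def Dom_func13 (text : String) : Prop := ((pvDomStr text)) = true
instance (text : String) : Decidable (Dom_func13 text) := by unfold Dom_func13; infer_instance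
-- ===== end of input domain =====

-- B uppercases the slices at positions 0 and 3 and concatenates (closed-form slices) instead of A's per-index loop with a branch; return values agree on every input.

-- ===== PORT A =====
-- A: loop x over range(len(text)), appending text[x].upper() at x = 0 or 3, else text[x].
def func13 (text : String) : String :=
  let textLength : Int := PySem.Str.len text
  let newText : List Char :=
    (PySem.List.pyRange 0 textLength 1).foldl
      (fun acc x =>
        if x == 0 || x == 3 then
          acc ++ [PySem.Chars.upperChar (PySem.List.pyGetD text.toList x ' ')]
        else
          acc ++ [PySem.List.pyGetD text.toList x ' ']) []
  String.ofList newText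

-- ===== PORT B =====
-- B: text[:1].upper() + text[1:3] + text[3:4].upper() + text[4:]
def func13_alt (text : String) : String :=
  String.ofList
    (PySem.Chars.upper (PySem.List.slice text.toList none (some 1)) ++
     PySem.List.slice text.toList (some 1) (some 3) ++
     PySem.Chars.upper (PySem.List.slice text.toList (some 3) (some 4)) ++
     PySem.List.slice text.toList (some 4) none)

-- ===== PRECONDITION & SPEC =====
def Spec_func13 (text : String) (out : String) : Prop := out = func13_alt text
instance (text : String) (out : String) : Decidable (Spec_func13 text out) := by unfold Spec_func13; infer_instance

-- ===== CLAIM (what is proved, stated in full; the proofs are below) =====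
def Claim_equal_func13 : Prop := ∀ (text : String), Dom_func13 text → Spec_func13 text (func13 text)

-- ===== LEMMAS AND PROOFS =====

lemma map_getD_range {α : Type} (l : List α) (d : α) :
    (List.range l.length).map (fun k => l.getD k d) = l := by
  apply List.ext_getElem
  · simp
  · intro i h1 h2
    simp [List.getD_eq_getElem?_getD, List.getElem?_eq_getElem h2]

lemma fold_body_eq (l : List Char) :
    (fun (acc : List Char) (x : Int) =>
      if x == 0 || x == 3 then
        acc ++ [PySem.Chars.upperChar (PySem.List.pyGetD l x ' ')]
      else
        acc ++ [PySem.List.pyGetD l x ' ']) =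
    (fun acc x => acc ++ [if x == 0 || x == 3 then
        PySem.Chars.upperChar (PySem.List.pyGetD l x ' ') else PySem.List.pyGetD l x ' ']) := by
  funext acc x
  by_cases h : (x == 0 || x == 3) = true <;> simp [h]

lemma key (l : List Char) :
    (PySem.List.pyRange 0 (l.length : Int) 1).foldl
      (fun acc x =>
        if x == 0 || x == 3 then
          acc ++ [PySem.Chars.upperChar (PySem.List.pyGetD l x ' ')]
        else
          acc ++ [PySem.List.pyGetD l x ' ']) [] =
    PySem.Chars.upper (PySem.List.slice l none (some 1)) ++
    PySem.List.slice l (some 1) (some 3) ++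
    PySem.Chars.upper (PySem.List.slice l (some 3) (some 4)) ++
    PySem.List.slice l (some 4) none := by
  rw [fold_body_eq, PySem.List.foldl_append_singleton_eq_map, List.nil_append,
    PySem.List.pyRange_zero_natCast, List.map_map]
  match l with
  | [] => rfl
  | [a] => rfl
  | [a, b] => rfl
  | [a, b, c] => rfl
  | a :: b :: c :: d :: r =>
    have hlen : (a :: b :: c :: d :: r).length = 4 + r.length := by simp; omega
    rw [hlen, List.range_add, List.map_append, List.map_map]
    have htail : (List.range r.length).map
        (((fun x => if x == 0 || x == 3 then
            PySem.Chars.upperChar (PySem.List.pyGetD (a :: b :: c :: d :: r) x ' ')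
          else PySem.List.pyGetD (a :: b :: c :: d :: r) x ' ') ∘
          (fun k : ℕ => (k : Int))) ∘ (fun x : ℕ => 4 + x)) =
        (List.range r.length).map (fun k => r.getD k ' ') := by
      apply List.map_congr_left
      intro k _
      have h0 : ¬ (((4 + k : ℕ) : Int) == 0 || ((4 + k : ℕ) : Int) == 3) = true := by
        simp; omega
      simp only [Function.comp, h0, if_false, Bool.false_eq_true]
      rw [PySem.List.pyGetD_natCast]
      have h4 : 4 + k = k + 1 + 1 + 1 + 1 := by omega
      rw [h4]
      simp
    rw [htail, map_getD_range]
    have hhead : (List.range 4).map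
        ((fun x => if x == 0 || x == 3 then
            PySem.Chars.upperChar (PySem.List.pyGetD (a :: b :: c :: d :: r) x ' ')
          else PySem.List.pyGetD (a :: b :: c :: d :: r) x ' ') ∘
          (fun k : ℕ => (k : Int))) = [PySem.Chars.upperChar a, b, c, PySem.Chars.upperChar d] := by
      norm_num [List.range_succ, PySem.List.pyGetD, PySem.List.pyGet?, PySem.List.pyIdx?]
      refine ⟨?_, ?_, ?_, ?_⟩ <;> rw [if_pos (by omega)] <;> simp
    rw [hhead]
    simp [PySem.List.slice, PySem.List.clampIdx, PySem.Chars.upper]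

-- ===== VERDICT (by name: the statement is the Claim_ definition above) =====
theorem func13_spec : Claim_equal_func13 := by
  intro text _
  unfold Spec_func13 func13 func13_alt
  simp only [PySem.Str.len]
  exact congrArg String.ofList (key text.toList)
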